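-- pv_equiv track=rewrite | github.com/mgspollo/AdventOfCode | 2023/days_1-10/7_camel_cards.py | rank_cards
-- ===== SOURCE A (Python) =====
-- card_deck_to_num = {
--     'A': 14, 'K': 13, 'Q': 12, 'J': 1, 'T': 10
-- }
--
-- play_list = ['five_oak', 'four_oak', 'full_house', 'three_oak', 'two_pair', 'one_pair', 'high_card']
--
-- def poker_key(hand):
--     hand_num = []
--     for card in hand:
--         if card.isnumeric():
--             hand_num.append(int(card))
--         else:
--             hand_num.append(card_deck_to_num[card])
--     return hand_num
--
-- def sort_cat(hands_cat):
--     return sorted(hands_cat, key=poker_key, reverse=True)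
--
-- def rank_cards(hands_to_cat):
--     sorted_hands = []
--     for play in play_list:
--         hands_cat = [h for h, c in hands_to_cat.items() if c == play]
--         sorted_hands.append(sort_cat(hands_cat))
--
--     hands_to_rank = {}
--     for i, hand in enumerate(sum(sorted_hands, [])[::-1]):
--         hands_to_rank[hand] = i+1
--
--     return hands_to_rank
-- ===== SOURCE B (Python) =====
-- card_deck_to_num = {
--     'A': 14, 'K': 13, 'Q': 12, 'J': 1, 'T': 10
-- }
--
-- play_list = ['five_oak', 'four_oak', 'full_house', 'three_oak', 'two_pair', 'one_pair', 'high_card']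
--
-- def poker_key(hand):
--     hand_num = []
--     for card in hand:
--         if card.isnumeric():
--             hand_num.append(int(card))
--         else:
--             hand_num.append(card_deck_to_num[card])
--     return hand_num
--
-- def rank_cards(hands_to_cat):
--     # one composite-key sort instead of seven per-category passes + concat + reversal
--     order = {cat: i for i, cat in enumerate(play_list)}
--     cand = [(h, c) for h, c in hands_to_cat.items() if c in order]
--     cand.sort(key=lambda hc: [-order[hc[1]]] + poker_key(hc[0]))
--     return {h: i + 1 for i, (h, _) in enumerate(cand)}
-- ===== Notes on version B (the rewrite author's own statement) =====
-- stated objective: simpler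
-- what changed: Replaces A's seven per-category filter plus descending-sort passes, the sum-based list concatenation and the final slice reversal by a single ascending sort under a composite key (negated category index prepended to the hand's card values).
-- outside the precondition, e.g. on rank_cards({'J': 'high_card', '1': 'high_card'}): A returns {'1': 1, 'J': 2}, B returns {'J': 1, '1': 2}
import Mathlib
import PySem

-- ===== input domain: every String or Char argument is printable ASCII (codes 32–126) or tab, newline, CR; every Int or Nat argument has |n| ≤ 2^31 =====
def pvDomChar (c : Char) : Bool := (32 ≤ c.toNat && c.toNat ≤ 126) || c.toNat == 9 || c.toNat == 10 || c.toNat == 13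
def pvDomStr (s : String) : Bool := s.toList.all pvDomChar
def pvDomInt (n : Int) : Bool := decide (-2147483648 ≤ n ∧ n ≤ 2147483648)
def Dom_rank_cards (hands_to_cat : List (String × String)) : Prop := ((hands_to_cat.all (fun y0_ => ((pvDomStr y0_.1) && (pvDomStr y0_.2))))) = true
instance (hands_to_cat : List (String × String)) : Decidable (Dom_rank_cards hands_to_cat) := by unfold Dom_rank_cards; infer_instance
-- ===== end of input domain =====

-- B replaces A's seven per-category filter/sort passes + sum + [::-1] reversal by one
-- composite-key ascending sort (objective: simpler).  hands_to_cat is a Python dict,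
-- ported as an association list with distinct keys.

-- shared helpers (both Pythons define the same card table and poker_key)
def pvPlayList : List String :=
  ["five_oak", "four_oak", "full_house", "three_oak", "two_pair", "one_pair", "high_card"]

def pvCardDeck : PySem.Dict Char Int :=
  PySem.Dict.ofList [('A', 14), ('K', 13), ('Q', 12), ('J', 1), ('T', 10)]

-- one card: `int(card)` on a single ASCII digit is its value (exact on the ASCII domain,
-- where str.isnumeric coincides with isdigit); the dict lookup is total only under Pre_.
def pvCardNum (c : Char) : Int :=
  if c.isDigit then (c.toNat : Int) - 48 else pvCardDeck.getD c 0

def pvPokerKey (hand : String) : List Int :=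
  hand.toList.foldl (fun acc c => acc ++ [pvCardNum c]) []

-- ===== PORT A =====
def rank_cards (hands_to_cat : List (String × String)) : List (String × Int) :=
  let sorted_hands : List (List String) :=
    pvPlayList.foldl
      (fun acc play =>
        acc ++ [PySem.List.sorted ((hands_to_cat.filter (fun p => p.2 == play)).map Prod.fst)
                  pvPokerKey true]) []
  let flat := sorted_hands.foldl (fun a b => a ++ b) []          -- sum(sorted_hands, [])
  let revd := (PySem.List.slice? flat none none (-1)).getD []    -- [::-1]
  ((PySem.List.enumerate revd 0).foldl
      (fun d ih => d.insert ih.2 (ih.1 + 1)) (PySem.Dict.empty : PySem.Dict String Int)).items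

-- ===== PORT B =====
def pvOrderDict : PySem.Dict String Int :=
  (PySem.List.enumerate pvPlayList 0).foldl (fun d ic => d.insert ic.2 ic.1) PySem.Dict.empty

def rank_cards_alt (hands_to_cat : List (String × String)) : List (String × Int) :=
  let cand := hands_to_cat.filter (fun p => pvOrderDict.contains p.2)
  let sc := PySem.List.sorted cand
      (fun p => (-(pvOrderDict.getD p.2 0)) :: pvPokerKey p.1) false
  ((PySem.List.enumerate sc 0).foldl
      (fun d ip => d.insert ip.2.1 (ip.1 + 1)) (PySem.Dict.empty : PySem.Dict String Int)).items

-- ===== PRECONDITION & SPEC =====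
-- Pre_ excludes (a) lists with duplicate hands (the argument is a Python dict: only
-- distinct keys represent one), (b) hands in a ranked category with a card outside
-- 0-9/A/K/Q/J/T, on which A raises KeyError, and (c) two distinct hands of the same
-- ranked category with equal card-value sequences (possible only because J is valued 1,
-- colliding with the digit '1'), where the tie order is an artefact of A's
-- reverse-then-reverse stable sorting and both orders are defensible.
def Pre_rank_cards (hands_to_cat : List (String × String)) : Prop :=
  (hands_to_cat.map Prod.fst).Nodup ∧
  (∀ p ∈ hands_to_cat, p.2 ∈ pvPlayList →
      (p.1.toList.all (fun c => c.isDigit || decide (c ∈ ['A', 'K', 'Q', 'J', 'T']))) = true) ∧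
  (∀ p ∈ hands_to_cat, ∀ q ∈ hands_to_cat, p.2 ∈ pvPlayList → p.2 = q.2 → p.1 ≠ q.1 →
      pvPokerKey p.1 ≠ pvPokerKey q.1)
instance (hands_to_cat : List (String × String)) : Decidable (Pre_rank_cards hands_to_cat) := by
  unfold Pre_rank_cards; infer_instance

def pvWitness_rank_cards : (List (String × String)) :=
  [("AKJ", "high_card"), ("TT9", "one_pair"), ("77", "one_pair"), ("Q2", "foo")]

def Spec_rank_cards (hands_to_cat : List (String × String)) (out : List (String × Int)) : Prop :=
  out = rank_cards_alt hands_to_cat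
instance (hands_to_cat : List (String × String)) (out : List (String × Int)) :
    Decidable (Spec_rank_cards hands_to_cat out) := by unfold Spec_rank_cards; infer_instance

-- ===== CLAIM (what is proved, stated in full; the proofs are below) =====
def Claim_equal_rank_cards : Prop :=
  ∀ (hands_to_cat : List (String × String)), Dom_rank_cards hands_to_cat →
    Pre_rank_cards hands_to_cat → Spec_rank_cards hands_to_cat (rank_cards hands_to_cat)

-- ===== LEMMAS AND PROOFS =====

-- wrappers restating PySem's order lemmas for the default List-Int instances the ports use
theorem pv_sorted_lt_wrap {α : Type} (xs ys : List α) (key : α → List Int)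
    (h1 : ys.Perm xs) (h2 : ys.Pairwise (fun a b => key a < key b)) :
    PySem.List.sorted xs key false = ys := by
  convert PySem.List.sorted_eq_of_perm_of_pairwise_lt xs ys key h1 h2 using 2

theorem pv_sorted_gt_wrap {α : Type} (xs ys : List α) (key : α → List Int)
    (h1 : ys.Perm xs) (h2 : ys.Pairwise (fun a b => key b < key a)) :
    PySem.List.sorted xs key true = ys := by
  convert PySem.List.sorted_rev_eq_of_perm_of_pairwise_gt xs ys key h1 h2 using 2

theorem pv_sorted_pairwise_wrap {α : Type} (xs : List α) (key : α → List Int) :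
    (PySem.List.sorted xs key false).Pairwise (fun a b => key a ≤ key b) := by
  convert PySem.List.sorted_pairwise xs key using 2

-- the ascending per-category sort of the PAIRS of category `play`
def pvAsc (l : List (String × String)) (play : String) : List (String × String) :=
  PySem.List.sorted (l.filter (fun p => p.2 == play)) (fun p => pvPokerKey p.1) false

-- B's composite key
def pvK (p : String × String) : List Int := (-(pvOrderDict.getD p.2 0)) :: pvPokerKey p.1

-- a stable ascending sort of a tie-free list is strictly increasing
theorem pv_sorted_strict {α : Type} (xs : List α) (k : α → List Int)
    (h : xs.Pairwise (fun a b => k a ≠ k b)) :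
    (PySem.List.sorted xs k false).Pairwise (fun a b => k a < k b) := by
  have hle := pv_sorted_pairwise_wrap xs k
  have hne : (PySem.List.sorted xs k false).Pairwise (fun a b => k a ≠ k b) :=
    h.perm (PySem.List.sorted_perm xs k false).symm (fun hxy => Ne.symm hxy)
  exact (hle.and hne).imp (fun ⟨h1, h2⟩ => lt_of_le_of_ne h1 h2)

theorem pv_count_filter_neg {α : Type} [BEq α] [LawfulBEq α] (l : List α) (p : α → Bool)
    (a : α) (h : p a = false) : List.count a (List.filter p l) = 0 := by
  rw [List.count_eq_zero]
  intro hmem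
  have := (List.mem_filter.mp hmem).2
  simp [h] at this

-- flatMap of the per-category filters is a permutation of the filter by membership
theorem pv_flatMap_filter_perm (l : List (String × String)) (P : List String) (hP : P.Nodup) :
    (P.flatMap (fun c => l.filter (fun p => p.2 == c))).Perm
      (l.filter (fun p => decide (p.2 ∈ P))) := by
  rw [List.perm_iff_count]
  intro a
  rw [List.count_flatMap]
  induction P with
  | nil => simp
  | cons c P ih =>
    have hc : c ∉ P := (List.nodup_cons.mp hP).1
    have ihc := ih (List.nodup_cons.mp hP).2
    by_cases h2 : a.2 = c
    · subst h2
      have h0 : (List.map (List.count a ∘ fun c => l.filter (fun p => p.2 == c)) P).sum = 0 := by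
        apply List.sum_eq_zero
        intro x hx
        rcases List.mem_map.mp hx with ⟨c', hc', hx'⟩
        have : a.2 ≠ c' := fun h => hc (h ▸ hc')
        rw [← hx']
        exact pv_count_filter_neg l _ a (by simp [this])
      simp only [List.map_cons, List.sum_cons, h0, add_zero, Function.comp]
      rw [List.count_filter (by simp), List.count_filter (by simp)]
    · have : List.count a (List.filter (fun p => p.2 == c) l) = 0 :=
        pv_count_filter_neg l _ a (by simp [h2])
      simp only [List.map_cons, List.sum_cons, Function.comp, this, zero_add]
      rw [ihc]
      by_cases hm : a.2 ∈ P
      · rw [List.count_filter (by simp [hm]), List.count_filter (by simp [hm, h2])]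
      · rw [pv_count_filter_neg l _ a (by simp [hm]),
            pv_count_filter_neg l _ a (by simp [hm, h2])]

-- pointwise permutations lift to flatMap
theorem pv_flatMap_perm_congr {α β : Type} (P : List α) (f g : α → List β)
    (h : ∀ c ∈ P, (f c).Perm (g c)) : (P.flatMap f).Perm (P.flatMap g) := by
  induction P with
  | nil => simp
  | cons c P ih =>
    simp only [List.flatMap_cons]
    exact (h c (by simp)).append (ih (fun c' hc' => h c' (List.mem_cons_of_mem _ hc')))

-- members of a filtered-by-category list carry that category
theorem pv_mem_filter_cat (l : List (String × String)) (play : String) (p : String × String)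
    (hp : p ∈ l.filter (fun q => q.2 == play)) : p.2 = play ∧ p ∈ l := by
  have := List.mem_filter.mp hp
  exact ⟨by simpa using this.2, this.1⟩

theorem pv_mem_asc (l : List (String × String)) (play : String) (p : String × String)
    (hp : p ∈ pvAsc l play) : p.2 = play ∧ p ∈ l := by
  apply pv_mem_filter_cat
  exact (PySem.List.mem_sorted _ _ _ _).mp hp

-- tie-freedom of each category group, from Pre_
theorem pv_group_ties (l : List (String × String)) (h : Pre_rank_cards l) (play : String)
    (hplay : play ∈ pvPlayList) :
    (l.filter (fun p => p.2 == play)).Pairwise (fun p q => pvPokerKey p.1 ≠ pvPokerKey q.1) := by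
  obtain ⟨hnd, -, hties⟩ := h
  have hfstne : l.Pairwise (fun p q => p.1 ≠ q.1) := List.pairwise_map.mp hnd
  have := List.Pairwise.filter (p := fun p => p.2 == play) hfstne
  refine this.imp_of_mem (R := fun p q => p.1 ≠ q.1) ?_
  intro p q hp hq hne
  obtain ⟨hp2, hpl⟩ := pv_mem_filter_cat l play p hp
  obtain ⟨hq2, hql⟩ := pv_mem_filter_cat l play q hq
  exact hties p hpl q hql (hp2 ▸ hplay) (hp2.trans hq2.symm) hne

-- the per-category strings A sorts descending = the reversed projection of pvAsc
theorem pv_groupA_eq (l : List (String × String)) (h : Pre_rank_cards l) (play : String)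
    (hplay : play ∈ pvPlayList) :
    PySem.List.sorted ((l.filter (fun p => p.2 == play)).map Prod.fst) pvPokerKey true
      = ((pvAsc l play).map Prod.fst).reverse := by
  apply pv_sorted_gt_wrap
  · exact (List.reverse_perm _).trans
      ((PySem.List.sorted_perm _ _ false).map Prod.fst)
  · rw [List.pairwise_reverse, List.pairwise_map]
    exact pv_sorted_strict _ _ (pv_group_ties l h play hplay)

-- enumerate over a mapped list
theorem pv_enumerate_map {α β : Type} (f : α → β) (xs : List α) (s : Int) :
    PySem.List.enumerate (xs.map f) s
      = (PySem.List.enumerate xs s).map (fun ip => (ip.1, f ip.2)) := by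
  induction xs generalizing s with
  | nil => simp [PySem.List.enumerate_nil]
  | cons x xs ih => simp [PySem.List.enumerate_cons, ih]

-- pvOrderDict membership / values on the literal list
theorem pv_contains_order (s : String) : pvOrderDict.contains s = decide (s ∈ pvPlayList) := by
  have h : ∀ b ∈ pvPlayList, (s == b) = (b == s) := by
    intro b _; cases hx : s == b
    · cases hy : b == s
      · rfl
      · exact absurd (eq_of_beq hy).symm (by simpa using hx)
    · simp [eq_of_beq hx]
  simp only [pvOrderDict, pvPlayList]
  simp [PySem.List.enumerate_cons, PySem.List.enumerate_nil, PySem.Dict.contains_insert,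
    List.mem_cons]
  cases hx : s == "five_oak" <;> cases h2 : s == "four_oak" <;>
    cases h3 : s == "full_house" <;> cases h4 : s == "three_oak" <;>
    cases h5 : s == "two_pair" <;> cases h6 : s == "one_pair" <;>
    cases h7 : s == "high_card" <;>
    simp_all [beq_iff_eq]

-- the weakest-first pair list both programs rank
def pvYs (l : List (String × String)) : List (String × String) :=
  pvPlayList.reverse.flatMap (pvAsc l)

theorem pv_ys_perm_cand (l : List (String × String)) :
    (pvYs l).Perm (l.filter (fun p => pvOrderDict.contains p.2)) := by
  have h1 : (pvYs l).Perm (pvPlayList.reverse.flatMap (fun c => l.filter (fun p => p.2 == c))) :=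
    pv_flatMap_perm_congr _ _ _ (fun c _ => PySem.List.sorted_perm _ _ false)
  have h2 := pv_flatMap_filter_perm l pvPlayList.reverse (by decide)
  have h3 : (l.filter (fun p => decide (p.2 ∈ pvPlayList.reverse))).Perm
      (l.filter (fun p => pvOrderDict.contains p.2)) := by
    apply List.Perm.of_eq
    apply List.filter_congr
    intro p _
    rw [pv_contains_order]
    simp [List.mem_reverse]
  exact (h1.trans h2).trans h3

theorem pv_ys_pairwise (l : List (String × String)) (h : Pre_rank_cards l) :
    (pvYs l).Pairwise (fun a b => pvK a < pvK b) := by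
  unfold pvYs
  rw [List.flatMap_def, List.pairwise_flatten]
  constructor
  · intro g hg
    rcases List.mem_map.mp hg with ⟨play, hplay, rfl⟩
    have hplay' : play ∈ pvPlayList := List.mem_reverse.mp hplay
    have hstrict : (pvAsc l play).Pairwise
        (fun p q => pvPokerKey p.1 < pvPokerKey q.1) :=
      pv_sorted_strict _ _ (pv_group_ties l h play hplay')
    refine hstrict.imp_of_mem ?_
    intro p q hp hq hlt
    have hp2 := (pv_mem_asc l play p hp).1
    have hq2 := (pv_mem_asc l play q hq).1
    unfold pvK
    rw [List.cons_lt_cons_iff]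
    exact Or.inr ⟨by rw [hp2, hq2], hlt⟩
  · rw [List.pairwise_map]
    have hord : pvPlayList.reverse.Pairwise
        (fun c c' => -(pvOrderDict.getD c 0) < -(pvOrderDict.getD c' 0)) := by decide
    refine hord.imp_of_mem ?_
    intro c c' hc hc' hlt p hp q hq
    have hp2 := (pv_mem_asc l c p hp).1
    have hq2 := (pv_mem_asc l c' q hq).1
    unfold pvK
    rw [List.cons_lt_cons_iff]
    exact Or.inl (by rw [hp2, hq2]; exact hlt)

-- the hand list A ranks equals the projection of pvYs
theorem pv_revd_eq (l : List (String × String)) (h : Pre_rank_cards l) :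
    (pvPlayList.map (fun play =>
        PySem.List.sorted ((l.filter (fun p => p.2 == play)).map Prod.fst) pvPokerKey true)).flatten.reverse
      = (pvYs l).map Prod.fst := by
  have hmap : pvPlayList.map (fun play =>
      PySem.List.sorted ((l.filter (fun p => p.2 == play)).map Prod.fst) pvPokerKey true)
      = pvPlayList.map (fun play => ((pvAsc l play).map Prod.fst).reverse) := by
    apply List.map_congr_left
    intro play hplay
    exact pv_groupA_eq l h play hplay
  rw [hmap, List.reverse_flatten]
  unfold pvYs
  rw [List.flatMap_def, List.map_flatten, List.map_map]
  rw [← List.map_reverse, List.map_map]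
  apply congrArg List.flatten
  apply List.map_congr_left
  intro play _
  simp [Function.comp]

-- ===== VERDICT (by name: the statement is the Claim_ definition above) =====
theorem rank_cards_spec : Claim_equal_rank_cards := by
  intro l _ h
  simp only [Spec_rank_cards, rank_cards, rank_cards_alt]
  have hsc : PySem.List.sorted (l.filter (fun p => pvOrderDict.contains p.2))
      (fun p => (-(pvOrderDict.getD p.2 0)) :: pvPokerKey p.1) false = pvYs l := by
    exact pv_sorted_lt_wrap _ _ pvK (pv_ys_perm_cand l) (pv_ys_pairwise l h)
  rw [hsc]
  have hflat : (pvPlayList.foldl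
      (fun acc play => acc ++ [PySem.List.sorted ((l.filter (fun p => p.2 == play)).map Prod.fst)
        pvPokerKey true]) []).foldl (fun a b => a ++ b) []
      = (pvPlayList.map (fun play =>
          PySem.List.sorted ((l.filter (fun p => p.2 == play)).map Prod.fst) pvPokerKey true)).flatten := by
    rw [PySem.List.foldl_append_singleton_eq_map, List.nil_append]
    rw [PySem.List.foldl_append_eq_flatMap (fun x => x), List.nil_append, List.flatMap_def,
      List.map_id']
  rw [hflat, PySem.List.slice?_none_none_neg_one, Option.getD_some, pv_revd_eq l h,
    pv_enumerate_map, List.foldl_map]
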